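-- pv_equiv track=rewrite | github.com/dwalke22/cs3280Project2 | utils.py | convert_netmask
-- ===== SOURCE A (Python) =====
-- def convert_netmask(net_mask):
--     """Converts a net mask to IPv4"""
--     ones = int(net_mask)
--     zeros = 32 - ones
--     mask = ""
--     for one in range(ones):
--         if ((one + 1) % 8) == 0:
--             mask += "1."
--         else:
--             mask += "1"
--     for _ in range(zeros):
--         length = len(mask)
--         if length % 9 == 7:
--             mask += "0."
--         else:
--             mask += "0"
--     return mask[:35]
-- ===== SOURCE B (Python) =====
-- def convert_netmask(net_mask):
--     """Converts a net mask to IPv4"""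
--     ones = min(max(int(net_mask), 0), 32)
--     bits = "1" * ones + "0" * (32 - ones)
--     return ".".join(bits[i:i + 8] for i in range(0, 32, 8))
-- ===== Notes on version B (the rewrite author's own statement) =====
-- stated objective: simpler
-- what changed: B replaces A's two character-appending loops with modular dot-insertion by a closed-form build: clamp the prefix to [0,32], construct the 32-bit string as '1'*ones+'0'*zeros, slice it into four octets and join with dots.
import Mathlib
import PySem

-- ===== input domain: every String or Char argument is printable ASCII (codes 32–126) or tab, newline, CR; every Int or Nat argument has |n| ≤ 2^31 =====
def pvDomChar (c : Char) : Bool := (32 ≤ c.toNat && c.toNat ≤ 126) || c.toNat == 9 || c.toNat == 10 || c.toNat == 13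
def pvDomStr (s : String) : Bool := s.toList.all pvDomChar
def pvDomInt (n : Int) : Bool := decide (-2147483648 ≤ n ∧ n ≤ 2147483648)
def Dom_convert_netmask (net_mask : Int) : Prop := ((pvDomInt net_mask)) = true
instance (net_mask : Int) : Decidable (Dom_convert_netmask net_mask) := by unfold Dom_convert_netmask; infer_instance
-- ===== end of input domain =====

-- B replaces A's two appending loops (with modular dot insertion) by a closed-form
-- build: clamp to [0,32], make the 32-bit string, slice into octets and join with dots.

-- ===== PORT A =====
-- one step of A's first loop ('1' per one, '1.' after every 8th)
def pvOneStep (mask : List Char) (one : Int) : List Char :=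
  if PySem.Int.mod (one + 1) 8 = 0 then mask ++ ['1', '.'] else mask ++ ['1']

-- one step of A's second loop ('0', or '0.' when len(mask) % 9 == 7)
def pvZeroStep (mask : List Char) (_ : Int) : List Char :=
  if PySem.Int.mod (mask.length : Int) 9 = 7 then mask ++ ['0', '.'] else mask ++ ['0']

def convert_netmask (net_mask : Int) : String :=
  let ones : Int := net_mask
  let zeros : Int := 32 - ones
  let mask : List Char := []
  let mask := (PySem.List.pyRange 0 ones 1).foldl pvOneStep mask
  let mask := (PySem.List.pyRange 0 zeros 1).foldl pvZeroStep mask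
  String.ofList (PySem.List.slice mask none (some 35))

-- ===== PORT B =====
def convert_netmask_alt (net_mask : Int) : String :=
  let ones : Int := min (max net_mask 0) 32
  let bits : List Char :=
    PySem.List.pyRepeat ['1'] ones ++ PySem.List.pyRepeat ['0'] (32 - ones)
  String.ofList
    (PySem.Chars.join ['.']
      ((PySem.List.pyRange 0 32 8).map
        (fun i => PySem.List.slice bits (some i) (some (i + 8)))))

-- ===== PRECONDITION & SPEC =====
def Spec_convert_netmask (net_mask : Int) (out : String) : Prop := out = convert_netmask_alt net_mask
instance (net_mask : Int) (out : String) : Decidable (Spec_convert_netmask net_mask out) := by unfold Spec_convert_netmask; infer_instance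

-- ===== CLAIM (what is proved, stated in full; the proofs are below) =====
def Claim_equal_convert_netmask : Prop := ∀ (net_mask : Int), Dom_convert_netmask net_mask → Spec_convert_netmask net_mask (convert_netmask net_mask)

-- ===== LEMMAS AND PROOFS =====

-- A's ones-loop result, as a function of the (integer) iteration bound
def pvOnes (m : Int) : List Char := (PySem.List.pyRange 0 m 1).foldl pvOneStep []
-- A's zeros-loop result starting from the empty mask (the n ≤ 0 case)
def pvZeros (z : Int) : List Char := (PySem.List.pyRange 0 z 1).foldl pvZeroStep []

theorem pvOnes_stable (k : Nat) :
    (pvOnes (33 + (k : Int))).take 35 = (pvOnes 33).take 35 ∧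
      36 ≤ (pvOnes (33 + (k : Int))).length := by
  induction k with
  | zero => exact ⟨rfl, by decide⟩
  | succ k ih =>
    have h : (33 + ((k + 1 : Nat) : Int)) = (33 + (k : Int)) + 1 := by push_cast; ring
    have hr := PySem.List.pyRange_one_succ_right (a := 0) (b := 33 + (k : Int)) (by omega)
    have hlen := ih.2
    have hstep : pvOnes (33 + ((k + 1 : Nat) : Int))
        = pvOneStep (pvOnes (33 + (k : Int))) (33 + (k : Int)) := by
      unfold pvOnes; rw [h, hr, List.foldl_append]; rfl
    constructor
    · rw [hstep, ← ih.1]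
      unfold pvOneStep
      split_ifs <;> exact List.take_append_of_le_length (by omega)
    · rw [hstep]
      unfold pvOneStep
      split_ifs <;> simp <;> omega

theorem pvZeros_stable (k : Nat) :
    (pvZeros (33 + (k : Int))).take 35 = (pvZeros 33).take 35 ∧
      36 ≤ (pvZeros (33 + (k : Int))).length := by
  induction k with
  | zero => exact ⟨rfl, by decide⟩
  | succ k ih =>
    have h : (33 + ((k + 1 : Nat) : Int)) = (33 + (k : Int)) + 1 := by push_cast; ring
    have hr := PySem.List.pyRange_one_succ_right (a := 0) (b := 33 + (k : Int)) (by omega)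
    have hlen := ih.2
    have hstep : pvZeros (33 + ((k + 1 : Nat) : Int))
        = pvZeroStep (pvZeros (33 + (k : Int))) (33 + (k : Int)) := by
      unfold pvZeros; rw [h, hr, List.foldl_append]; rfl
    constructor
    · rw [hstep, ← ih.1]
      unfold pvZeroStep
      split_ifs <;> exact List.take_append_of_le_length (by omega)
    · rw [hstep]
      unfold pvZeroStep
      split_ifs <;> simp <;> omega

-- ===== VERDICT (by name: the statement is the Claim_ definition above) =====
set_option maxRecDepth 8192 in
theorem convert_netmask_spec : Claim_equal_convert_netmask := by
  intro n _
  unfold Spec_convert_netmask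
  rcases lt_trichotomy n 0 with hneg | hz | hpos
  · -- n < 0 : ones loop empty, zeros loop runs 32 - n ≥ 33 times
    have hmax : max n 0 = 0 := by omega
    have hz : (32 - n) = 33 + (((-1 - n).toNat : Nat) : Int) := by omega
    have hones : PySem.List.pyRange 0 n 1 = [] :=
      PySem.List.pyRange_one_eq_nil (by omega)
    have hst := (pvZeros_stable ((-1 - n).toNat)).1
    unfold convert_netmask convert_netmask_alt
    simp only [hmax, hones, List.foldl_nil]
    rw [hz]
    rw [show PySem.List.slice ((PySem.List.pyRange 0 (33 + (((-1 - n).toNat : Nat) : Int)) 1).foldl pvZeroStep []) none (some 35)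
        = ((pvZeros (33 + (((-1 - n).toNat : Nat) : Int))).take 35) from by
      unfold pvZeros
      rw [show (35 : Int) = ((35 : Nat) : Int) from rfl, PySem.List.slice_to_natCast]]
    rw [hst]
    decide
  · subst hz; decide
  · rcases le_or_gt n 32 with hle | hgt
    · -- 1 ≤ n ≤ 32 : both loops concrete
      interval_cases n <;> decide
    · -- n > 32 : zeros loop empty, ones loop runs n ≥ 33 times
      have hmm : min (max n 0) 32 = 32 := by omega
      have hn : n = 33 + (((n - 33).toNat : Nat) : Int) := by omega
      have hzr : PySem.List.pyRange 0 (32 - n) 1 = [] :=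
        PySem.List.pyRange_one_eq_nil (by omega)
      have hst := (pvOnes_stable ((n - 33).toNat)).1
      unfold convert_netmask convert_netmask_alt
      simp only [hmm, hzr, List.foldl_nil]
      rw [hn]
      rw [show PySem.List.slice ((PySem.List.pyRange 0 (33 + (((n - 33).toNat : Nat) : Int)) 1).foldl pvOneStep []) none (some 35)
          = ((pvOnes (33 + (((n - 33).toNat : Nat) : Int))).take 35) from by
        unfold pvOnes
        rw [show (35 : Int) = ((35 : Nat) : Int) from rfl, PySem.List.slice_to_natCast]]
      rw [hst]
      decide
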